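-- pv_equiv track=rewrite | github.com/danieldeutsch/sacrerouge | sacrerouge/datasets/duc_tac/duc2003/tasks.py | split_into_tags
-- ===== SOURCE A (Python) =====
-- from typing import Any, Dict, List
--
-- def split_into_tags(lines: List[str]) -> List[List[str]]:
--     tags = []
--     current = []
--     for line in lines:
--         line = line.strip()
--         if not line:
--             continue
--         if line.startswith('<'):
--             # New tag
--             if current:
--                 tags.append(current)
--             current = [line]
--         else:
--             current.append(line)
--     if current:
--         tags.append(current)
--     return tags
-- ===== SOURCE B (Python) =====
-- from typing import Any, Dict, List
--
-- def split_into_tags(lines: List[str]) -> List[List[str]]: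
--     cleaned = [l.strip() for l in lines if l.strip()]
--     groups = []
--     k = 0
--     for i, line in enumerate(cleaned):
--         if i and line.startswith('<'):
--             groups.append(cleaned[k:i])
--             k = i
--     if cleaned:
--         groups.append(cleaned[k:])
--     return groups
-- ===== Notes on version B (the rewrite author's own statement) =====
-- stated objective: alternative
-- what changed: B separates filtering from grouping: it first builds the cleaned (stripped, nonempty) list, then finds tag boundaries with enumerate and emits groups as slices between consecutive boundaries, instead of A's single pass with a running 'current' accumulator.
import Mathlib
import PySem

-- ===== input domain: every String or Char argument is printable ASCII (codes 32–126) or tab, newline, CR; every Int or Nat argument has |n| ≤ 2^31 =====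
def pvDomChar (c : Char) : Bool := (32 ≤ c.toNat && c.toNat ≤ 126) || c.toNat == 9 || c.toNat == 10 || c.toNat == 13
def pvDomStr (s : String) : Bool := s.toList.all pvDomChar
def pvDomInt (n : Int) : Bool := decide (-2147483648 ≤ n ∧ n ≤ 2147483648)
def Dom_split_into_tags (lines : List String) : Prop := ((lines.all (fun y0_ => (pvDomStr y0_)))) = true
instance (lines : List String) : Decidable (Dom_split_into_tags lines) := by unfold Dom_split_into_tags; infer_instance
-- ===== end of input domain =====

-- B separates filtering from grouping: it builds the cleaned list once, then emits groups as
-- slices between '<'-boundary indices, instead of A's running accumulator (objective: alternative).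

-- ===== PORT A =====
-- loop body of A: strip, skip empties, start a new tag on '<', else extend current
-- (Python's rebinding 'line = line.strip()' is inlined)
def aStep (st : List (List String) × List String) (line : String) :
    List (List String) × List String :=
  if PySem.Str.strip line = "" then st
  else if PySem.Str.startswith (PySem.Str.strip line) "<" then
    ((if st.2 ≠ [] then st.1 ++ [st.2] else st.1), [PySem.Str.strip line])
  else (st.1, st.2 ++ [PySem.Str.strip line])

def split_into_tags (lines : List String) : List (List String) :=
  let st := lines.foldl aStep ([], [])
  if st.2 ≠ [] then st.1 ++ [st.2] else st.1

-- ===== PORT B =====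
-- B: cleaned = [l.strip() for l in lines if l.strip()]
def bClean (lines : List String) : List String :=
  lines.filterMap (fun l =>
    if PySem.Str.strip l = "" then none else some (PySem.Str.strip l))

-- loop body of B: at a boundary (i ≠ 0 and line starts with '<') emit slice cleaned[k:i], set k := i
def bStep (cleaned : List String) (st : List (List String) × Int) (p : Int × String) :
    List (List String) × Int :=
  if p.1 ≠ 0 ∧ PySem.Str.startswith p.2 "<" then
    (st.1 ++ [PySem.List.slice cleaned (some st.2) (some p.1)], p.1)
  else st

def split_into_tags_alt (lines : List String) : List (List String) :=
  let cleaned := bClean lines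
  let st := (PySem.List.enumerate cleaned 0).foldl (bStep cleaned) ([], 0)
  if cleaned ≠ [] then st.1 ++ [PySem.List.slice cleaned (some st.2) none] else st.1

-- ===== PRECONDITION & SPEC =====
def Spec_split_into_tags (lines : List String) (out : List (List String)) : Prop := out = split_into_tags_alt lines
instance (lines : List String) (out : List (List String)) : Decidable (Spec_split_into_tags lines out) := by unfold Spec_split_into_tags; infer_instance

-- ===== CLAIM (what is proved, stated in full; the proofs are below) =====
def Claim_equal_split_into_tags : Prop := ∀ (lines : List String), Dom_split_into_tags lines → Spec_split_into_tags lines (split_into_tags lines)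

-- ===== LEMMAS AND PROOFS =====

-- A's step specialised to already-cleaned lines (stripped, nonempty): no strip, no skip
def cStep (st : List (List String) × List String) (line : String) :
    List (List String) × List String :=
  if PySem.Str.startswith line "<" then
    ((if st.2 ≠ [] then st.1 ++ [st.2] else st.1), [line])
  else (st.1, st.2 ++ [line])

def finA (st : List (List String) × List String) : List (List String) :=
  if st.2 ≠ [] then st.1 ++ [st.2] else st.1

def finB (cl : List String) (st : List (List String) × Int) : List (List String) :=
  if cl ≠ [] then st.1 ++ [PySem.List.slice cl (some st.2) none] else st.1

lemma bClean_cons (l : String) (ls : List String) :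
    bClean (l :: ls) = if PySem.Str.strip l = "" then bClean ls
      else PySem.Str.strip l :: bClean ls := by
  simp only [bClean, List.filterMap_cons]
  split_ifs with h <;> rfl

-- A's fold over the raw lines equals the clean fold over bClean lines
lemma foldl_aStep_eq_cStep (lines : List String) (st : List (List String) × List String) :
    lines.foldl aStep st = (bClean lines).foldl cStep st := by
  induction lines generalizing st with
  | nil => rfl
  | cons l ls ih =>
    rw [bClean_cons, List.foldl_cons]
    by_cases h : PySem.Str.strip l = ""
    · have hstep : aStep st l = st := by
        unfold aStep
        rw [if_pos h]
      rw [if_pos h, hstep, ih]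
    · have hstep : aStep st l = cStep st (PySem.Str.strip l) := by
        unfold aStep cStep
        rw [if_neg h]
      rw [if_neg h, List.foldl_cons, hstep, ih]

-- main simulation: A's accumulator fold over the cleaned suffix ↔ B's boundary/slice fold
lemma sim (cl : List String) (ss : List String) (i k : Nat) (g : List (List String))
    (hdrop : cl.drop i = ss)
    (hinv : (i = 0 ∧ k = 0) ∨ (k < i ∧ k < cl.length)) :
    finA (ss.foldl cStep (g, (cl.drop k).take (i - k)))
      = finB cl ((PySem.List.enumerate ss (i : Int)).foldl (bStep cl) (g, (k : Int))) := by
  induction ss generalizing i k g with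
  | nil =>
    simp only [List.foldl_nil, PySem.List.enumerate_nil]
    have hlen : cl.length ≤ i := by
      have := congrArg List.length hdrop
      simp at this; omega
    have htake : (cl.drop k).take (i - k) = cl.drop k := by
      apply List.take_of_length_le; simp; omega
    rw [htake]
    unfold finA finB
    rw [PySem.List.slice_from_natCast]
    by_cases hcl : cl = []
    · subst hcl
      rcases hinv with ⟨_, hk⟩ | ⟨_, hk⟩ <;> simp_all
    · have hne : cl.drop k ≠ [] := by
        rcases hinv with ⟨_, hk⟩ | ⟨_, hk⟩
        · subst hk; simpa using hcl
        · simp [List.drop_eq_nil_iff]; omega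
      simp [hne, hcl]
  | cons l ss' ih =>
    have hi : i < cl.length := by
      by_contra h
      rw [List.drop_eq_nil_of_le (by omega)] at hdrop
      exact (List.cons_ne_nil _ _) hdrop.symm
    have hki : k ≤ i := by rcases hinv with ⟨h1, h2⟩ | ⟨h1, h2⟩ <;> omega
    have hdrop' : cl.drop (i + 1) = ss' := by
      have : (cl.drop i).drop 1 = ss' := by rw [hdrop]; rfl
      rwa [List.drop_drop] at this
    have hcur_len : ((cl.drop k).take (i - k)).length = i - k := by
      simp; omega
    have hsplit : cl.drop k = (cl.drop k).take (i - k) ++ (l :: ss') := by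
      conv_lhs => rw [← List.take_append_drop (i - k) (cl.drop k)]
      congr 1
      rw [List.drop_drop]
      rw [show k + (i - k) = i from by omega]
      exact hdrop
    rw [PySem.List.enumerate_cons, List.foldl_cons, List.foldl_cons]
    by_cases hsw : PySem.Str.startswith l "<" = true
    · by_cases hi0 : i = 0
      · -- first element: A starts current := [l]; B's boundary test is false (i = 0)
        have hk0 : k = 0 := by rcases hinv with ⟨_, h⟩ | ⟨h, _⟩ <;> omega
        subst hi0; subst hk0
        have hcl : cl = l :: ss' := by simpa using hdrop
        have hA : cStep (g, (cl.drop 0).take (0 - 0)) l = (g, [l]) := by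
          unfold cStep
          rw [if_pos hsw]
          simp
        have hB : bStep cl (g, ((0 : Nat) : Int)) (((0 : Nat) : Int), l) = (g, ((0 : Nat) : Int)) := by
          unfold bStep
          rw [if_neg (fun hc => hc.1 (by norm_num))]
        rw [hA, hB]
        have := ih 1 0 g (by simpa using hdrop') (Or.inr ⟨by omega, by omega⟩)
        simpa [hcl] using this
      · -- boundary: A flushes current, B emits the slice cleaned[k:i]
        have hklt : k < i ∧ k < cl.length := by
          rcases hinv with ⟨h, _⟩ | h
          · omega
          · exact h
        have hcurne : (cl.drop k).take (i - k) ≠ [] := by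
          intro h
          have := congrArg List.length h
          rw [hcur_len] at this
          simp at this; omega
        have hA : cStep (g, (cl.drop k).take (i - k)) l
            = (g ++ [(cl.drop k).take (i - k)], [l]) := by
          unfold cStep
          rw [if_pos hsw, if_pos hcurne]
        have hB : bStep cl (g, (k : Int)) ((i : Nat), l)
            = (g ++ [(cl.drop k).take (i - k)], (i : Int)) := by
          unfold bStep
          rw [if_pos ⟨fun hc => hi0 (by simpa using hc), hsw⟩, PySem.List.slice_natCast]
        rw [hA, hB]
        have := ih (i + 1) i (g ++ [(cl.drop k).take (i - k)]) hdrop' (Or.inr ⟨by omega, hi⟩)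
        have hcur1 : (cl.drop i).take (i + 1 - i) = [l] := by
          rw [hdrop]; simp
        rw [hcur1] at this
        have hcast : ((i : Nat) : Int) + 1 = ((i + 1 : Nat) : Int) := by push_cast; ring
        rw [hcast]
        exact this
    · -- not a boundary: A extends current, B leaves its state unchanged
      have hA : cStep (g, (cl.drop k).take (i - k)) l
          = (g, (cl.drop k).take (i - k) ++ [l]) := by
        unfold cStep
        rw [if_neg hsw]
      have hB : bStep cl (g, (k : Int)) ((i : Nat), l) = (g, (k : Int)) := by
        unfold bStep
        rw [if_neg (fun hc => hsw hc.2)]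
      rw [hA, hB]
      have hcur' : (cl.drop k).take (i + 1 - k) = (cl.drop k).take (i - k) ++ [l] := by
        calc (cl.drop k).take (i + 1 - k)
            = ((cl.drop k).take (i - k) ++ (l :: ss')).take
                (((cl.drop k).take (i - k)).length + 1) := by
              rw [← hsplit]
              congr 1
              omega
          _ = (cl.drop k).take (i - k) ++ [l] := by
              rw [List.take_length_add_append]
              rfl
      have hinv' : (i + 1 = 0 ∧ k = 0) ∨ (k < i + 1 ∧ k < cl.length) := by
        rcases hinv with ⟨h1, h2⟩ | ⟨h1, h2⟩
        · right; constructor <;> omega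
        · right; exact ⟨by omega, h2⟩
      have := ih (i + 1) k g hdrop' hinv'
      rw [hcur'] at this
      have hcast : ((i : Nat) : Int) + 1 = ((i + 1 : Nat) : Int) := by push_cast; ring
      rw [hcast]
      exact this

-- ===== VERDICT (by name: the statement is the Claim_ definition above) =====
theorem split_into_tags_spec : Claim_equal_split_into_tags := by
  intro lines _
  unfold Spec_split_into_tags split_into_tags split_into_tags_alt
  rw [foldl_aStep_eq_cStep]
  have := sim (bClean lines) (bClean lines) 0 0 [] (by simp) (Or.inl ⟨rfl, rfl⟩)
  simpa [finA, finB] using this
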